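-- pv_equiv track=rewrite | github.com/gugolple/advent_of_code | 2015/03e.py | entry_func
-- ===== SOURCE A (Python) =====
-- def addTuples(tp1, tp2):
--     return tuple([i + j for i, j in zip(tp1, tp2)])
--
-- def entry_func(inp_str) -> int:
--     npd = {
--         "^": (1, 0),
--         ">": (0, 1),
--         "v": (-1, 0),
--         "<": (0, -1),
--     }
--     cp1 = (0, 0)
--     cp2 = (0, 0)
--     sh = set()
--     sh.add(cp1)
--     nm = 0
--     for l in inp_str.strip().split("\n"):
--         for m in l:
--             ncp = None
--             if nm == 0:
--                 cp1 = addTuples(cp1, npd[m])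
--                 ncp = cp1
--                 nm = 1
--             else:
--                 cp2 = addTuples(cp2, npd[m])
--                 ncp = cp2
--                 nm = 0
--             sh.add(ncp)
--     return len(sh)
-- ===== SOURCE B (Python) =====
-- def entry_func(inp_str) -> int:
--     npd = {
--         "^": (1, 0),
--         ">": (0, 1),
--         "v": (-1, 0),
--         "<": (0, -1),
--     }
--     deltas = [npd[m] for line in inp_str.strip().split("\n") for m in line]
--     visited = {(0, 0)}
--     for stream in (deltas[0::2], deltas[1::2]):
--         x, y = 0, 0
--         for dx, dy in stream:
--             x += dx
--             y += dy
--             visited.add((x, y))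
--     return len(visited)
-- ===== Notes on version B (the rewrite author's own statement) =====
-- stated objective: alternative
-- what changed: A walks the moves in one alternating pass updating two cursors and one shared visited set; B builds the list of move deltas once, deinterleaves it with the two stride-2 slices, accumulates each mover's path independently, and returns the size of the union of both paths plus the origin.
import Mathlib
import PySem

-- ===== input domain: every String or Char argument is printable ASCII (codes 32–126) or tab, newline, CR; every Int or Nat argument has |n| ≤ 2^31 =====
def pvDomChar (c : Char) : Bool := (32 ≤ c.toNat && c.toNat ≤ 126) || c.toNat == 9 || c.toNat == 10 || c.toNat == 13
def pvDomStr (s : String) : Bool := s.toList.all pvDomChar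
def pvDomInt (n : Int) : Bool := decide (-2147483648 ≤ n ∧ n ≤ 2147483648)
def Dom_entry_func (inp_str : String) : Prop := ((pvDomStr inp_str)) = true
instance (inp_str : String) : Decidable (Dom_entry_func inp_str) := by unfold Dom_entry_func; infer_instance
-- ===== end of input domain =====

-- B replaces A's single alternating two-mover pass by building the delta list once, deinterleaving it
-- with slices and accumulating each mover's path independently (alternative decomposition, same cost).

-- ===== PORT A =====
-- npd[m] : none = Python KeyError (excluded by Pre_)
def pvNpd (c : Char) : Option (Int × Int) :=
  if c = '^' then some (1, 0)
  else if c = '>' then some (0, 1)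
  else if c = 'v' then some (-1, 0)
  else if c = '<' then some (0, -1)
  else none

-- addTuples on 2-tuples
def pvAddT (p q : Int × Int) : Int × Int := (p.1 + q.1, p.2 + q.2)

-- one loop-body step of A over state (cp1, cp2, sh, nm); Option threads the KeyError
def pvStepA (st : Option ((Int × Int) × (Int × Int) × PySem.Set (Int × Int) × Int))
    (c : Char) : Option ((Int × Int) × (Int × Int) × PySem.Set (Int × Int) × Int) :=
  st.bind fun s =>
    (pvNpd c).map fun d =>
      if s.2.2.2 = 0 then
        (pvAddT s.1 d, s.2.1, (s.2.2.1).add (pvAddT s.1 d), 1)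
      else
        (s.1, pvAddT s.2.1 d, (s.2.2.1).add (pvAddT s.2.1 d), 0)

def entry_func (inp_str : String) : Int :=
  let lines := (PySem.Str.split? (PySem.Str.strip inp_str) "\n").getD []
  let init : Option ((Int × Int) × (Int × Int) × PySem.Set (Int × Int) × Int) :=
    some ((0, 0), (0, 0), PySem.Set.add PySem.Set.empty ((0, 0) : Int × Int), 0)
  match lines.foldl (fun st l => l.toList.foldl pvStepA st) init with
  | some s => PySem.Set.len s.2.2.1
  | none => 0      -- unreachable under Pre_ (Python raises KeyError there)

-- ===== PORT B =====
def entry_func_alt (inp_str : String) : Int :=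
  let lines := (PySem.Str.split? (PySem.Str.strip inp_str) "\n").getD []
  -- deltas = [npd[m] for line in … for m in line]; none = KeyError on the first bad char
  match (lines.flatMap (fun l => l.toList)).mapM pvNpd with
  | none => 0      -- unreachable under Pre_ (Python raises KeyError there)
  | some deltas =>
    let evens := (PySem.List.slice? deltas (some 0) none 2).getD []   -- deltas[0::2]
    let odds  := (PySem.List.slice? deltas (some 1) none 2).getD []   -- deltas[1::2]
    let visited := [evens, odds].foldl
      (fun vis stream =>
        (stream.foldl
          (fun (st : (Int × Int) × PySem.Set (Int × Int)) d =>
            let np := pvAddT st.1 d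
            (np, PySem.Set.add st.2 np))
          (((0, 0) : Int × Int), vis)).2)
      (PySem.Set.add PySem.Set.empty ((0, 0) : Int × Int))
    PySem.Set.len visited

-- ===== PRECONDITION & SPEC =====
-- Pre_ excludes exactly the inputs on which Python A raises KeyError: some line (after strip and
-- splitting on the newline separator) contains a character that is not a direction key of npd.
def Pre_entry_func (inp_str : String) : Prop :=
  (((PySem.Str.split? (PySem.Str.strip inp_str) "\n").getD []).all
    (fun l => l.toList.all (fun c => c == '^' || c == '>' || c == 'v' || c == '<'))) = true
instance (inp_str : String) : Decidable (Pre_entry_func inp_str) := by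
  unfold Pre_entry_func; infer_instance

def pvWitness_entry_func : String := "^^<v\n>v<"

def Spec_entry_func (inp_str : String) (out : Int) : Prop := out = entry_func_alt inp_str
instance (inp_str : String) (out : Int) : Decidable (Spec_entry_func inp_str out) := by
  unfold Spec_entry_func; infer_instance

-- ===== CLAIM (what is proved, stated in full; the proofs are below) =====
def Claim_equal_entry_func : Prop :=
  ∀ (inp_str : String), Dom_entry_func inp_str → Pre_entry_func inp_str →
    Spec_entry_func inp_str (entry_func inp_str)

-- ===== LEMMAS AND PROOFS =====

-- every other element starting at index 0
def pvEvens {α : Type} : List α → List α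
  | [] => []
  | [a] => [a]
  | a :: _ :: rest => a :: pvEvens rest

def pvOdds {α : Type} (xs : List α) : List α := pvEvens xs.tail

theorem pvEvens_cons {α : Type} (d : α) (l : List α) :
    pvEvens (d :: l) = d :: pvOdds l := by
  cases l <;> simp [pvEvens, pvOdds]

-- pure (KeyError-free) step of A over the delta list
def pvStep (s : (Int × Int) × (Int × Int) × PySem.Set (Int × Int) × Int)
    (d : Int × Int) : (Int × Int) × (Int × Int) × PySem.Set (Int × Int) × Int :=
  if s.2.2.2 = 0 then
    (pvAddT s.1 d, s.2.1, (s.2.2.1).add (pvAddT s.1 d), 1)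
  else
    (s.1, pvAddT s.2.1 d, (s.2.2.1).add (pvAddT s.2.1 d), 0)

-- cumulative path of one mover
def pvPath (c : Int × Int) : List (Int × Int) → List (Int × Int)
  | [] => []
  | d :: ds => pvAddT c d :: pvPath (pvAddT c d) ds

theorem pvFoldA_flatten (lines : List String)
    (st : Option ((Int × Int) × (Int × Int) × PySem.Set (Int × Int) × Int)) :
    lines.foldl (fun st l => l.toList.foldl pvStepA st) st
      = (lines.flatMap (fun l => l.toList)).foldl pvStepA st := by
  induction lines generalizing st with
  | nil => rfl
  | cons l ls ih => simp [List.flatMap_cons, List.foldl_append, ih]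

theorem pvFoldA_some (cs : List Char) (ds : List (Int × Int))
    (st : (Int × Int) × (Int × Int) × PySem.Set (Int × Int) × Int)
    (h : cs.mapM pvNpd = some ds) :
    cs.foldl pvStepA (some st) = some (ds.foldl pvStep st) := by
  induction cs generalizing ds st with
  | nil =>
    simp only [List.mapM_nil] at h
    cases h
    rfl
  | cons c cs ih =>
    cases hc : pvNpd c with
    | none => rw [List.mapM_cons, hc] at h; simp at h
    | some d =>
      rw [List.mapM_cons, hc] at h
      cases hds' : List.mapM pvNpd cs with
      | none => rw [hds'] at h; simp at h
      | some ds'' =>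
        rw [hds'] at h
        simp at h
        subst h
        simp [List.foldl_cons, pvStepA, hc, ih ds'' _ hds', pvStep]

theorem pvMapM_some (cs : List Char)
    (h : ∀ c ∈ cs, c = '^' ∨ c = '>' ∨ c = 'v' ∨ c = '<') :
    ∃ ds, cs.mapM pvNpd = some ds := by
  induction cs with
  | nil => exact ⟨[], rfl⟩
  | cons c cs ih =>
    obtain ⟨ds, hds⟩ := ih (fun x hx => h x (by simp [hx]))
    have hc : (pvNpd c).isSome := by
      rcases h c (by simp) with h | h | h | h <;> simp [h, pvNpd]
    obtain ⟨d, hd⟩ := Option.isSome_iff_exists.mp hc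
    exact ⟨d :: ds, by rw [List.mapM_cons, hd, hds]; rfl⟩

-- membership in A's visited set after folding the whole delta list
theorem pvA_mem (ds : List (Int × Int)) :
    ∀ (c1 c2 : Int × Int) (sh : PySem.Set (Int × Int)) (nm : Int) (x : Int × Int),
    x ∈ (ds.foldl pvStep (c1, c2, sh, nm)).2.2.1 ↔
      x ∈ sh ∨
      (if nm = 0 then x ∈ pvPath c1 (pvEvens ds) ∨ x ∈ pvPath c2 (pvOdds ds)
       else x ∈ pvPath c2 (pvEvens ds) ∨ x ∈ pvPath c1 (pvOdds ds)) := by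
  induction ds using pvEvens.induct with
  | case1 => intro c1 c2 sh nm x; simp [pvEvens, pvOdds, pvPath]
  | case2 a =>
    intro c1 c2 sh nm x
    by_cases hnm : nm = 0 <;>
      simp [pvStep, hnm, pvEvens, pvOdds, pvPath, PySem.Set.mem_add]
  | case3 a b rest ih =>
    intro c1 c2 sh nm x
    by_cases hnm : nm = 0
    · rw [show ((a :: b :: rest).foldl pvStep (c1, c2, sh, nm))
            = (rest.foldl pvStep (pvAddT c1 a, pvAddT c2 b,
                ((sh.add (pvAddT c1 a)).add (pvAddT c2 b)), 0)) by
          simp [List.foldl_cons, pvStep, hnm]]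
      rw [ih (pvAddT c1 a) (pvAddT c2 b) _ 0 x]
      simp [hnm, pvEvens_cons, pvOdds, pvEvens, pvPath, PySem.Set.mem_add,
        PySem.Set.mem_add ((sh.add (pvAddT c1 a))) (pvAddT c2 b) x]
      tauto
    · rw [show ((a :: b :: rest).foldl pvStep (c1, c2, sh, nm))
            = (rest.foldl pvStep (pvAddT c1 b, pvAddT c2 a,
                ((sh.add (pvAddT c2 a)).add (pvAddT c1 b)), 1)) by
          simp [List.foldl_cons, pvStep, hnm]]
      rw [ih (pvAddT c1 b) (pvAddT c2 a) _ 1 x]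
      simp [hnm, show (1:Int) ≠ 0 by decide, pvEvens_cons, pvOdds, pvEvens, pvPath, PySem.Set.mem_add,
        PySem.Set.mem_add ((sh.add (pvAddT c2 a))) (pvAddT c1 b) x]
      tauto

theorem pvA_nodup (ds : List (Int × Int)) :
    ∀ (c1 c2 : Int × Int) (sh : PySem.Set (Int × Int)) (nm : Int),
    sh.Nodup → (ds.foldl pvStep (c1, c2, sh, nm)).2.2.1.Nodup := by
  induction ds with
  | nil => intro _ _ _ _ h; exact h
  | cons d ds ih =>
    intro c1 c2 sh nm h
    rw [List.foldl_cons]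
    unfold pvStep
    split
    · exact ih _ _ _ _ (PySem.Set.nodup_add _ _ h)
    · exact ih _ _ _ _ (PySem.Set.nodup_add _ _ h)

-- B's inner accumulation loop
theorem pvB_mem (stream : List (Int × Int)) :
    ∀ (c : Int × Int) (vis : PySem.Set (Int × Int)) (x : Int × Int),
    x ∈ (stream.foldl
          (fun (st : (Int × Int) × PySem.Set (Int × Int)) d =>
            (pvAddT st.1 d, PySem.Set.add st.2 (pvAddT st.1 d))) (c, vis)).2 ↔
      x ∈ vis ∨ x ∈ pvPath c stream := by
  induction stream with
  | nil => intro c vis x; simp [pvPath]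
  | cons d ds ih =>
    intro c vis x
    rw [List.foldl_cons]
    rw [ih (pvAddT c d) (vis.add (pvAddT c d)) x]
    simp [pvPath, PySem.Set.mem_add]
    tauto

theorem pvB_nodup (stream : List (Int × Int)) :
    ∀ (c : Int × Int) (vis : PySem.Set (Int × Int)), vis.Nodup →
    (stream.foldl
          (fun (st : (Int × Int) × PySem.Set (Int × Int)) d =>
            (pvAddT st.1 d, PySem.Set.add st.2 (pvAddT st.1 d))) (c, vis)).2.Nodup := by
  induction stream with
  | nil => intro _ _ h; exact h
  | cons d ds ih => intro c vis h; exact ih _ _ (PySem.Set.nodup_add _ _ h)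

-- slicing with step 2 = deinterleave
theorem pvFilterMapEvens {α : Type} (xs : List α) :
    ∀ n : Nat, xs.length ≤ 2 * n →
    (List.range n).filterMap (fun k => xs[2 * k]?) = pvEvens xs := by
  induction xs using pvEvens.induct with
  | case1 =>
    intro n _; simp [pvEvens]
  | case2 a =>
    intro n hn
    obtain ⟨m, rfl⟩ : ∃ m, n = m + 1 := ⟨n - 1, by simp at hn; omega⟩
    rw [List.range_succ_eq_map, List.filterMap_cons]
    simp only [List.filterMap_map, Function.comp_def]
    have h1 : ([a] : List α)[2*0]? = some a := by simp
    have h2 : ∀ k : Nat, ([a] : List α)[2*(k+1)]? = none := by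
      intro k; apply List.getElem?_eq_none; simp; omega
    simp only [h1, h2]
    simp [pvEvens]
  | case3 a b rest ih =>
    intro n hn
    obtain ⟨m, rfl⟩ : ∃ m, n = m + 1 := ⟨n - 1, by simp at hn; omega⟩
    rw [List.range_succ_eq_map, List.filterMap_cons]
    simp only [List.filterMap_map, Function.comp_def]
    have h1 : (a :: b :: rest)[2 * 0]? = some a := by simp
    have h2 : ∀ k : Nat, (a :: b :: rest)[2 * (k + 1)]? = rest[2 * k]? := by
      intro k
      rw [show 2 * (k + 1) = 2 * k + 1 + 1 by omega]
      simp
    simp only [h1, h2]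
    rw [ih m (by simp at hn; omega)]
    simp [pvEvens]

theorem pvSlice0 (xs : List (Int × Int)) :
    (PySem.List.slice? xs (some 0) none 2).getD [] = pvEvens xs := by
  simp only [PySem.List.slice?, PySem.List.sliceIndices]
  norm_num
  have hfun : (fun x : Nat => xs[((2:Int) * x).toNat]?) = fun x : Nat => xs[2*x]? := by
    funext k; rw [show ((2:Int) * (k:Int)).toNat = 2*k by omega]
  rw [hfun]
  by_cases h : 0 < xs.length
  · rw [if_pos h, show (((xs.length:Int)+2-1)/2).toNat = (xs.length+1)/2 by omega]
    exact pvFilterMapEvens xs ((xs.length+1)/2) (by omega)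
  · rw [if_neg h]
    obtain rfl : xs = [] := List.length_eq_zero_iff.mp (by omega)
    simp [pvEvens]

theorem pvSlice1 (xs : List (Int × Int)) :
    (PySem.List.slice? xs (some 1) none 2).getD [] = pvOdds xs := by
  simp only [PySem.List.slice?, PySem.List.sliceIndices]
  norm_num
  by_cases h : 1 < xs.length
  · have hmin : min (1:Int) (xs.length:Int) = 1 := by omega
    rw [hmin, if_pos h]
    have hfun : (fun x : Nat => xs[((1:Int) + 2 * x).toNat]?)
        = fun x : Nat => xs.tail[2*x]? := by
      funext k
      rw [show ((1:Int) + 2 * (k:Int)).toNat = 2 * k + 1 by omega]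
      cases xs <;> simp
    rw [hfun, show (((xs.length:Int) - 1 + 2 - 1)/2).toNat = xs.length/2 by omega]
    rw [pvFilterMapEvens xs.tail (xs.length/2) (by simp [List.length_tail]; omega)]
    rfl
  · rw [if_neg h]
    cases xs with
    | nil => simp [pvOdds, pvEvens]
    | cons a l =>
      have hl : l = [] := by
        cases l with
        | nil => rfl
        | cons b m => exact absurd (by simp) h
      subst hl
      simp [pvOdds, pvEvens]

theorem pvMain (ds : List (Int × Int)) :
    PySem.Set.len ((ds.foldl pvStep ((0,0), (0,0),
        PySem.Set.add PySem.Set.empty ((0,0) : Int × Int), 0)).2.2.1)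
      = PySem.Set.len ([pvEvens ds, pvOdds ds].foldl
          (fun vis stream =>
            (stream.foldl
              (fun (st : (Int × Int) × PySem.Set (Int × Int)) d =>
                (pvAddT st.1 d, PySem.Set.add st.2 (pvAddT st.1 d)))
              (((0, 0) : Int × Int), vis)).2)
          (PySem.Set.add PySem.Set.empty ((0, 0) : Int × Int))) := by
  have hnd0 : (PySem.Set.add PySem.Set.empty ((0,0) : Int × Int)).Nodup := by decide
  have hndA := pvA_nodup ds (0,0) (0,0) _ 0 hnd0
  have hndB : ([pvEvens ds, pvOdds ds].foldl
      (fun vis stream =>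
        (stream.foldl
          (fun (st : (Int × Int) × PySem.Set (Int × Int)) d =>
            (pvAddT st.1 d, PySem.Set.add st.2 (pvAddT st.1 d)))
          (((0, 0) : Int × Int), vis)).2)
      (PySem.Set.add PySem.Set.empty ((0, 0) : Int × Int))).Nodup := by
    simp only [List.foldl_cons, List.foldl_nil]
    exact pvB_nodup _ _ _ (pvB_nodup _ _ _ hnd0)
  have hmem : ∀ x, x ∈ ((ds.foldl pvStep ((0,0), (0,0),
      PySem.Set.add PySem.Set.empty ((0,0) : Int × Int), 0)).2.2.1) ↔
      x ∈ ([pvEvens ds, pvOdds ds].foldl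
        (fun vis stream =>
          (stream.foldl
            (fun (st : (Int × Int) × PySem.Set (Int × Int)) d =>
              (pvAddT st.1 d, PySem.Set.add st.2 (pvAddT st.1 d)))
            (((0, 0) : Int × Int), vis)).2)
        (PySem.Set.add PySem.Set.empty ((0, 0) : Int × Int))) := by
    intro x
    rw [pvA_mem]
    simp only [List.foldl_cons, List.foldl_nil]
    rw [pvB_mem, pvB_mem]
    split_ifs with h
    · tauto
    · exact absurd trivial h
  have hperm := (List.perm_ext_iff_of_nodup hndA hndB).mpr hmem
  simp only [PySem.Set.len, hperm.length_eq]

-- ===== VERDICT (by name: the statement is the Claim_ definition above) =====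
set_option maxHeartbeats 1000000 in
theorem entry_func_spec : Claim_equal_entry_func := by
  intro inp_str _ hpre
  unfold Pre_entry_func at hpre
  unfold Spec_entry_func entry_func entry_func_alt
  dsimp only
  set lines := (PySem.Str.split? (PySem.Str.strip inp_str) "\n").getD [] with hlines
  have hall : ∀ c ∈ lines.flatMap (fun l => l.toList),
      c = '^' ∨ c = '>' ∨ c = 'v' ∨ c = '<' := by
    intro c hc
    obtain ⟨l, hl, hcl⟩ := List.mem_flatMap.mp hc
    have h2 := List.all_eq_true.mp (List.all_eq_true.mp hpre l hl) c hcl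
    simp only [Bool.or_eq_true, beq_iff_eq] at h2
    rcases h2 with ((h | h) | h) | h
    · exact Or.inl h
    · exact Or.inr (Or.inl h)
    · exact Or.inr (Or.inr (Or.inl h))
    · exact Or.inr (Or.inr (Or.inr h))
  obtain ⟨ds, hds⟩ := pvMapM_some _ hall
  rw [pvFoldA_flatten, pvFoldA_some _ ds _ hds, hds]
  dsimp only
  simp only [pvSlice0, pvSlice1]
  exact pvMain ds
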